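-- pv_equiv track=rewrite | github.com/GeoffRiley/AdventOfCode | 2020/11/day11.py | seating_system_part1
-- ===== SOURCE A (Python) =====
-- from typing import Dict
--
-- FLOOR = '.'
--
-- SEAT = 'L'
--
-- OCCUPIED = '#'
--
-- NEIGHBOURS = (-1 - 1j, -1 + 0j, -1 + 1j, 0 - 1j, 0 + 1j, 1 - 1j, 1 + 0j, 1 + 1j)
--
-- def neighbours_type1(grid: Dict[complex, str], pos: complex) -> int:
--     return sum(grid.get(pos + n, SEAT) == OCCUPIED for n in NEIGHBOURS)
--
-- def neighbours_type2(grid: Dict[complex, str], pos: complex) -> int: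
--     total = 0
--     for n in NEIGHBOURS:
--         p = pos
--         status = grid.get(p + n, SEAT)
--         while status == FLOOR:
--             p += n
--             status = grid.get(p + n, SEAT)
--         total += 1 if status == OCCUPIED else 0
--     return total
--
-- def generation(grid: Dict[complex, str], gen_type: int = 1) -> Dict[complex, str]:
--     neighbours, neighbours_cut = (neighbours_type1, 4) if gen_type == 1 else (neighbours_type2, 5)
--     new_grid = dict()
--     for pos, old_value in grid.items():
--         neighbour_count = neighbours(grid, pos)
--         new_grid[pos] = (FLOOR if old_value == FLOOR else
--                          OCCUPIED if old_value == SEAT and neighbour_count == 0 else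
--                          SEAT if old_value == OCCUPIED and neighbour_count >= neighbours_cut else
--                          old_value)
--     return new_grid
--
-- def seat_count(grid: Dict[complex, str]) -> int:
--     return sum(1 for value in grid.values() if value == OCCUPIED)
--
-- def seating_system_part1(data: str) -> int:
--     grid = {(x + y * 1j): ch for y, row in enumerate(data.splitlines(keepends=False)) for x, ch in enumerate(row)}
--
--     done = False
--     gen = 0
--     last_seat_count = 0
--     while not done:
--         new_grid = generation(grid)
--         gen += 1
--         grid = new_grid
--         count = seat_count(grid)
--         done = last_seat_count == count
--         last_seat_count = count
--     return seat_count(grid)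
-- ===== SOURCE B (Python) =====
-- OFFSETS = tuple((dx, dy) for dx in (-1, 0, 1) for dy in (-1, 0, 1) if (dx, dy) != (0, 0))
--
--
-- def seating_system_part1(data: str) -> int:
--     # Build a static seat graph once: floor and off-grid cells can never be
--     # occupied, so the simulation only needs the seats ('L'/'#'), a prebuilt
--     # adjacency list of seat indices, and a boolean occupancy vector.
--     seats = []
--     index = {}
--     for y, row in enumerate(data.splitlines()):
--         for x, ch in enumerate(row):
--             if ch == 'L' or ch == '#':
--                 index[(x, y)] = len(seats)
--                 seats.append((x, y, ch == '#'))
--     adj = [[index[(x + dx, y + dy)] for dx, dy in OFFSETS if (x + dx, y + dy) in index]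
--            for x, y, _ in seats]
--     occ = [o for _, _, o in seats]
--     last = 0
--     while True:
--         counts = [sum(occ[j] for j in neigh) for neigh in adj]
--         occ = [c == 0 if not o else c < 4 for o, c in zip(occ, counts)]
--         cnt = sum(occ)
--         if cnt == last:
--             return cnt
--         last = cnt
-- ===== Notes on version B (the rewrite author's own statement) =====
-- stated objective: faster
-- what changed: B compiles the grid once into a static seat graph (row-major seat list, position-to-index dict, prebuilt adjacency lists of seat indices) and then simulates only a boolean occupancy vector over that graph, instead of A's per-generation dict probing of all cells (floor included) with complex-number neighbour arithmetic.
import Mathlib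
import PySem

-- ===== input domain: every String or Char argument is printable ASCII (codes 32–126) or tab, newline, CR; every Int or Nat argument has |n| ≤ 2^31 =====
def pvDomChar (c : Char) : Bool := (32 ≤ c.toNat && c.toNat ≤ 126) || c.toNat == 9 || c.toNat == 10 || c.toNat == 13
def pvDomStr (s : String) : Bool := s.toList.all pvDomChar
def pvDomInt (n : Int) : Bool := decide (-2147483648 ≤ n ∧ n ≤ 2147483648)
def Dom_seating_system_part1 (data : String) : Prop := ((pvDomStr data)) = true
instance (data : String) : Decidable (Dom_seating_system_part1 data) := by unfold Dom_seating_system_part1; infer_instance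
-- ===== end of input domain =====

-- B compiles the grid once into a static seat graph (seat list + position→index dict + adjacency
-- lists of seat indices) and simulates only a boolean occupancy vector over it, instead of A's
-- per-generation dict probing of every cell; objective: faster (constant factor, measured).
-- Python's while-loop has no fuel; both ports run the same loop on a fuel that exceeds the step at
-- which any terminating run stops (each cell ranges over at most 2 values, so the count sequence is
-- eventually periodic with preperiod + period ≤ 2^(cells+1)); no claim is made about inputs on
-- which Python's loop diverges.

-- ===== PORT A =====
-- complex x + y*1j is represented as the pair (x, y) : Int × Int
def pvNeighbours : List (Int × Int) :=
  [(-1, -1), (-1, 0), (-1, 1), (0, -1), (0, 1), (1, -1), (1, 0), (1, 1)]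

-- neighbours_type1
def pvNt1 (g : PySem.Dict (Int × Int) Char) (pos : Int × Int) : Int :=
  (pvNeighbours.map (fun n => if g.getD (pos.1 + n.1, pos.2 + n.2) 'L' = '#' then (1 : Int) else 0)).sum

-- generation; only the gen_type = 1 branch is reachable from seating_system_part1, so
-- neighbours = neighbours_type1 and neighbours_cut = 4 are inlined
def pvGeneration (g : PySem.Dict (Int × Int) Char) : PySem.Dict (Int × Int) Char :=
  g.items.foldl (fun ng pv =>
    let c := pvNt1 g pv.1
    ng.insert pv.1
      (if pv.2 = '.' then '.'
       else if pv.2 = 'L' ∧ c = 0 then '#'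
       else if pv.2 = '#' ∧ c ≥ 4 then 'L'
       else pv.2)) PySem.Dict.empty

-- seat_count
def pvSeatCount (g : PySem.Dict (Int × Int) Char) : Int :=
  (g.values.map (fun v => if v = '#' then (1 : Int) else 0)).sum

-- the dict comprehension {(x + y*1j): ch for y, row in … for x, ch in …}
def pvParse (data : String) : PySem.Dict (Int × Int) Char :=
  (PySem.List.enumerate (PySem.Str.splitlines data) 0).foldl
    (fun g yr => (PySem.List.enumerate yr.2.toList 0).foldl
        (fun g' xc => g'.insert (xc.1, yr.1) xc.2) g)
    PySem.Dict.empty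

-- the while-loop (gen counter omitted: it is never read); fuel only makes it total
def pvLoopA : Nat → PySem.Dict (Int × Int) Char → Int → Int
  | 0, g, _ => pvSeatCount g
  | f + 1, g, last =>
    let ng := pvGeneration g
    let c := pvSeatCount ng
    if last = c then c else pvLoopA f ng c

def seating_system_part1 (data : String) : Int :=
  let g := pvParse data
  pvLoopA (2 ^ (g.size + 1) + 2) g 0

-- ===== PORT B =====
-- Source B's OFFSETS comprehension `(dx, dy) for dx in (-1,0,1) for dy in (-1,0,1) if (dx,dy) != (0,0)`
def pvAltOffsets : List (Int × Int) :=
  (([-1, 0, 1] : List Int).flatMap (fun dx => ([-1, 0, 1] : List Int).map (fun dy => (dx, dy)))).filter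
    (fun d => d ≠ (0, 0))

-- the seat-collection loop: seats = [(x, y, ch == '#') …], index = {(x, y): running length}
def pvCollect (data : String) : List (Int × Int × Bool) × PySem.Dict (Int × Int) Nat :=
  (PySem.List.enumerate (PySem.Str.splitlines data) 0).foldl
    (fun st yr => (PySem.List.enumerate yr.2.toList 0).foldl
      (fun st' xc =>
        if xc.2 = 'L' ∨ xc.2 = '#' then
          (st'.1 ++ [(xc.1, yr.1, xc.2 == '#')], st'.2.insert (xc.1, yr.1) st'.1.length)
        else st') st)
    ([], PySem.Dict.empty)

-- `[index[p + d] for d in offsets if p + d in index]`: membership test + lookup = filterMap get?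
def pvAdj (seats : List (Int × Int × Bool)) (index : PySem.Dict (Int × Int) Nat) : List (List Nat) :=
  seats.map (fun s => pvAltOffsets.filterMap (fun d => index.get? (s.1 + d.1, s.2.1 + d.2)))

-- sum() of a list of Python booleans
def pvBoolSum (l : List Bool) : Int := (l.map (fun b => if b then (1 : Int) else 0)).sum

-- the while-loop of Source B; fuel only makes it total (same bound as A's port)
def pvLoopAlt (adj : List (List Nat)) : Nat → List Bool → Int → Int
  | 0, occ, _ => pvBoolSum occ
  | f + 1, occ, last =>
    let counts := adj.map (fun neigh =>
      (neigh.map (fun j => if occ.getD j false then (1 : Int) else 0)).sum)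
    let occ' := List.zipWith (fun o c => if o then decide (c < 4) else decide (c = 0)) occ counts
    let cnt := pvBoolSum occ'
    if last = cnt then cnt else pvLoopAlt adj f occ' cnt

def seating_system_part1_alt (data : String) : Int :=
  let p := pvCollect data
  let adj := pvAdj p.1 p.2
  let occ := p.1.map (fun s => s.2.2)
  pvLoopAlt adj (2 ^ (((PySem.Str.splitlines data).map (fun r => r.toList.length)).sum + 1) + 2) occ 0

-- ===== PRECONDITION & SPEC =====
def Spec_seating_system_part1 (data : String) (out : Int) : Prop := out = seating_system_part1_alt data
instance (data : String) (out : Int) : Decidable (Spec_seating_system_part1 data out) := by unfold Spec_seating_system_part1; infer_instance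

-- ===== CLAIM (what is proved, stated in full; the proofs are below) =====
def Claim_equal_seating_system_part1 : Prop := ∀ (data : String), Dom_seating_system_part1 data → Spec_seating_system_part1 data (seating_system_part1 data)

-- ===== LEMMAS AND PROOFS =====

-- ---- an intermediate row-of-lists simulation of the same automaton, used only by the proofs ----

def pvCell? (rows : List (List Char)) (x y : Int) : Option Char :=
  if 0 ≤ y ∧ 0 ≤ x then (rows[y.toNat]?).bind (fun r => r[x.toNat]?) else none

def pvOccupiedAround (rows : List (List Char)) (x y : Int) : Int :=
  (pvNeighbours.map (fun d => if pvCell? rows (x + d.1) (y + d.2) = some '#' then (1 : Int) else 0)).sum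

def pvStep (rows : List (List Char)) : List (List Char) :=
  (PySem.List.enumerate rows 0).map (fun yr =>
    (PySem.List.enumerate yr.2 0).map (fun xc =>
      if xc.2 = 'L' ∨ xc.2 = '#' then
        (if xc.2 = 'L' ∧ pvOccupiedAround rows xc.1 yr.1 = 0 then '#'
         else if xc.2 = '#' ∧ pvOccupiedAround rows xc.1 yr.1 ≥ 4 then 'L'
         else xc.2)
      else xc.2))

def pvCountOcc (rows : List (List Char)) : Int :=
  (rows.map (fun r => (PySem.List.count r '#' : Int))).sum

def rowsLoop : Nat → List (List Char) → Int → Int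
  | 0, rows, _ => pvCountOcc rows
  | f + 1, rows, last =>
    let nr := pvStep rows
    let c := pvCountOcc nr
    if last = c then c else rowsLoop f nr c

-- ---- A's dict grid ↔ the rows simulation ----

-- the items list of A's grid dict, written with explicit coordinate counters
def rItems (y x : Int) : List Char → List ((Int × Int) × Char)
  | [] => []
  | c :: cs => ((x, y), c) :: rItems y (x + 1) cs

def gItems (y : Int) : List (List Char) → List ((Int × Int) × Char)
  | [] => []
  | r :: rs => rItems y 0 r ++ gItems (y + 1) rs

-- B's step, written with explicit coordinate counters
def stepRow (R : List (List Char)) (y : Int) (x : Int) : List Char → List Char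
  | [] => []
  | c :: cs =>
    (if c = 'L' ∨ c = '#' then
        (if c = 'L' ∧ pvOccupiedAround R x y = 0 then '#'
         else if c = '#' ∧ pvOccupiedAround R x y ≥ 4 then 'L'
         else c)
      else c) :: stepRow R y (x + 1) cs

def stepAll (R : List (List Char)) (y : Int) : List (List Char) → List (List Char)
  | [] => []
  | r :: rs => stepRow R y 0 r :: stepAll R (y + 1) rs

theorem enumMap_eq_rItems (y : Int) (row : List Char) : ∀ s,
    (PySem.List.enumerate row s).map (fun xc => ((xc.1, y), xc.2)) = rItems y s row := by
  induction row with
  | nil => intro s; simp [rItems, PySem.List.enumerate_nil]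
  | cons c cs ih => intro s; rw [PySem.List.enumerate_cons]; simp [rItems, ih]

theorem get?_mk_append {l1 l2 : List ((Int × Int) × Char)} (k : Int × Int) :
    (PySem.Dict.mk (l1 ++ l2)).get? k =
      ((PySem.Dict.mk l1).get? k).orElse (fun _ => (PySem.Dict.mk l2).get? k) := by
  induction l1 with
  | nil => rfl
  | cons p l ih =>
    rw [List.cons_append, PySem.Dict.get?_mk_cons, PySem.Dict.get?_mk_cons]
    by_cases h : (p.1 == k) = true
    · simp [h]
    · simp only [h]
      rw [if_neg (by simp_all), if_neg (by simp_all)]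
      exact ih

theorem get?_rItems (row : List Char) (y0 x y : Int) : ∀ s,
    (PySem.Dict.mk (rItems y0 s row)).get? (x, y) =
      if y = y0 ∧ s ≤ x then row[(x - s).toNat]? else none := by
  induction row with
  | nil =>
    intro s
    rw [show rItems y0 s [] = [] from rfl]
    rw [show (PySem.Dict.mk ([] : List ((Int × Int) × Char))).get? (x, y) = none from rfl]
    split_ifs with h
    · simp
    · rfl
  | cons c cs ih =>
    intro s
    rw [show rItems y0 s (c :: cs) = ((s, y0), c) :: rItems y0 (s + 1) cs from rfl]
    rw [PySem.Dict.get?_mk_cons]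
    by_cases heq : ((s, y0) : Int × Int) = (x, y)
    · obtain ⟨hx, hy⟩ := Prod.mk.injEq .. ▸ heq
      subst hx; subst hy
      simp
    · have hb : (((s, y0) : Int × Int) == (x, y)) = false := by
        simpa using heq
      rw [hb, if_neg (by simp)]
      rw [ih (s + 1)]
      have hne : ¬(s = x ∧ y0 = y) := by
        intro h; exact heq (by rw [h.1, h.2])
      by_cases hyy : y = y0
      · subst hyy
        by_cases hsx : s + 1 ≤ x
        · rw [if_pos ⟨rfl, hsx⟩, if_pos ⟨rfl, by omega⟩]
          have h1 : (x - s).toNat = (x - (s + 1)).toNat + 1 := by omega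
          rw [h1, List.getElem?_cons_succ]
        · rw [if_neg (fun h => hsx (by have := h.2; omega)), if_neg]
          intro h
          exact hne ⟨by omega, rfl⟩
      · rw [if_neg (fun h => hyy h.1), if_neg (fun h => hyy h.1)]

theorem get?_gItems (l : List (List Char)) (x y : Int) : ∀ y0,
    (PySem.Dict.mk (gItems y0 l)).get? (x, y) =
      if 0 ≤ x ∧ y0 ≤ y then (l[(y - y0).toNat]?).bind (fun r => r[x.toNat]?) else none := by
  induction l with
  | nil =>
    intro y0
    rw [show gItems y0 [] = [] from rfl,
        show (PySem.Dict.mk ([] : List ((Int × Int) × Char))).get? (x, y) = none from rfl]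
    split_ifs with h
    · simp
    · rfl
  | cons r rs ih =>
    intro y0
    rw [show gItems y0 (r :: rs) = rItems y0 0 r ++ gItems (y0 + 1) rs from rfl]
    rw [get?_mk_append, get?_rItems, ih (y0 + 1)]
    by_cases hx : 0 ≤ x
    · by_cases hyy : y = y0
      · subst hyy
        simp [hx, show ¬(y + 1 ≤ y) from by omega,]
      · have hstep : y0 ≤ y ↔ y0 + 1 ≤ y := by omega
        simp only [hyy, false_and, if_false, Option.orElse, hx, true_and, hstep]
        by_cases hc : y0 + 1 ≤ y
        · simp only [hc, if_true,
            show (y - y0).toNat = (y - (y0 + 1)).toNat + 1 from by omega,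
            List.getElem?_cons_succ]
        · simp [hc]
    · simp [hx]

theorem get?_gItems_zero (l : List (List Char)) (x y : Int) :
    (PySem.Dict.mk (gItems 0 l)).get? (x, y) = pvCell? l x y := by
  rw [get?_gItems, pvCell?]
  by_cases h : 0 ≤ x ∧ 0 ≤ y
  · rw [if_pos ⟨h.1, h.2⟩, if_pos ⟨h.2, h.1⟩, show y - 0 = y from by omega]
  · rw [if_neg (fun h2 => h ⟨h2.1, h2.2⟩), if_neg (fun h2 => h ⟨h2.2, h2.1⟩)]

theorem mem_rItems_fst (y : Int) (row : List Char) : ∀ x k, k ∈ (rItems y x row).map Prod.fst →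
    x ≤ k.1 ∧ k.2 = y := by
  induction row with
  | nil => intro x k h; simp [rItems] at h
  | cons c cs ih =>
    intro x k h
    rw [rItems, List.map_cons, List.mem_cons] at h
    rcases h with h | h
    · subst h; exact ⟨le_refl _, rfl⟩
    · have := ih (x + 1) k h
      exact ⟨by omega, this.2⟩

theorem mem_gItems_fst (l : List (List Char)) : ∀ y0 k, k ∈ (gItems y0 l).map Prod.fst →
    y0 ≤ k.2 := by
  induction l with
  | nil => intro y0 k h; simp [gItems] at h
  | cons r rs ih =>
    intro y0 k h
    rw [gItems, List.map_append, List.mem_append] at h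
    rcases h with h | h
    · exact le_of_eq (mem_rItems_fst y0 r 0 k h).2.symm
    · have := ih (y0 + 1) k h
      omega

theorem nodup_rItems_fst (y : Int) (row : List Char) : ∀ x, ((rItems y x row).map Prod.fst).Nodup := by
  induction row with
  | nil => intro x; simp [rItems]
  | cons c cs ih =>
    intro x
    rw [rItems, List.map_cons, List.nodup_cons]
    refine ⟨fun h => ?_, ih (x + 1)⟩
    have := mem_rItems_fst y cs (x + 1) (x, y) h
    omega

theorem nodup_keys_gItems (l : List (List Char)) : ∀ y0, ((gItems y0 l).map Prod.fst).Nodup := by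
  induction l with
  | nil => intro y0; simp [gItems]
  | cons r rs ih =>
    intro y0
    rw [gItems, List.map_append, List.nodup_append]
    refine ⟨nodup_rItems_fst y0 r 0, ih (y0 + 1), ?_⟩
    intro k hk k' hk' hkk
    have h1 := (mem_rItems_fst y0 r 0 k hk).2
    have h2 := mem_gItems_fst rs (y0 + 1) k' hk'
    subst hkk
    omega

theorem getD_option_sharp (o : Option Char) : (o.getD 'L' = '#') = (o = some '#') := by
  cases o with
  | none => simp
  | some v => simp

theorem nt1_eq_occupiedAround (rows : List (List Char)) (x y : Int) :
    pvNt1 (PySem.Dict.mk (gItems 0 rows)) (x, y) = pvOccupiedAround rows x y := by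
  unfold pvNt1 pvOccupiedAround pvNeighbours
  congr 1
  apply List.map_congr_left
  intro d _
  simp only [PySem.Dict.getD_eq_get?_getD, get?_gItems_zero, getD_option_sharp]

theorem stepRow_eq (R : List (List Char)) (y : Int) (row : List Char) : ∀ s,
    (PySem.List.enumerate row s).map (fun xc =>
      if xc.2 = 'L' ∨ xc.2 = '#' then
        (if xc.2 = 'L' ∧ pvOccupiedAround R xc.1 y = 0 then '#'
         else if xc.2 = '#' ∧ pvOccupiedAround R xc.1 y ≥ 4 then 'L'
         else xc.2)
      else xc.2) = stepRow R y s row := by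
  induction row with
  | nil => intro s; simp [stepRow, PySem.List.enumerate_nil]
  | cons c cs ih => intro s; rw [PySem.List.enumerate_cons]; simp only [List.map_cons, stepRow, ih]

theorem pvStep_eq_stepAll (rows : List (List Char)) : pvStep rows = stepAll rows 0 rows := by
  unfold pvStep
  suffices h : ∀ (l : List (List Char)) (y0 : Int),
      (PySem.List.enumerate l y0).map (fun yr =>
        (PySem.List.enumerate yr.2 0).map (fun xc =>
          if xc.2 = 'L' ∨ xc.2 = '#' then
            (if xc.2 = 'L' ∧ pvOccupiedAround rows xc.1 yr.1 = 0 then '#'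
             else if xc.2 = '#' ∧ pvOccupiedAround rows xc.1 yr.1 ≥ 4 then 'L'
             else xc.2)
          else xc.2)) = stepAll rows y0 l by
    exact h rows 0
  intro l
  induction l with
  | nil => intro y0; simp [stepAll, PySem.List.enumerate_nil]
  | cons r rs ih =>
    intro y0
    rw [PySem.List.enumerate_cons]
    simp only [List.map_cons, stepAll, ih]
    rw [stepRow_eq]

theorem rItems_stepRow (R : List (List Char)) (y : Int) (row : List Char) : ∀ s,
    rItems y s (stepRow R y s row) = (rItems y s row).map (fun pv =>
      (pv.1,
        if pv.2 = 'L' ∨ pv.2 = '#' then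
          (if pv.2 = 'L' ∧ pvOccupiedAround R pv.1.1 pv.1.2 = 0 then '#'
           else if pv.2 = '#' ∧ pvOccupiedAround R pv.1.1 pv.1.2 ≥ 4 then 'L'
           else pv.2)
        else pv.2)) := by
  induction row with
  | nil => intro s; simp [stepRow, rItems]
  | cons c cs ih =>
    intro s
    rw [stepRow, rItems, rItems, List.map_cons, ih (s + 1)]

theorem gItems_stepAll (R : List (List Char)) (l : List (List Char)) : ∀ y0,
    gItems y0 (stepAll R y0 l) = (gItems y0 l).map (fun pv =>
      (pv.1,
        if pv.2 = 'L' ∨ pv.2 = '#' then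
          (if pv.2 = 'L' ∧ pvOccupiedAround R pv.1.1 pv.1.2 = 0 then '#'
           else if pv.2 = '#' ∧ pvOccupiedAround R pv.1.1 pv.1.2 ≥ 4 then 'L'
           else pv.2)
        else pv.2)) := by
  induction l with
  | nil => intro y0; simp [stepAll, gItems]
  | cons r rs ih =>
    intro y0
    rw [stepAll, gItems, gItems, List.map_append, rItems_stepRow, ih (y0 + 1)]

theorem trans_eq (v : Char) (n : Int) :
    (if v = '.' then '.'
     else if v = 'L' ∧ n = 0 then '#'
     else if v = '#' ∧ n ≥ 4 then 'L'
     else v)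
    = (if v = 'L' ∨ v = '#' then
        (if v = 'L' ∧ n = 0 then '#'
         else if v = '#' ∧ n ≥ 4 then 'L'
         else v)
      else v) := by
  by_cases h1 : v = 'L'
  · subst h1; simp
  · by_cases h2 : v = '#'
    · subst h2; simp
    · by_cases h3 : v = '.'
      · subst h3; simp
      · simp [h1, h2, h3]

theorem generation_eq_step (rows : List (List Char)) :
    pvGeneration (PySem.Dict.mk (gItems 0 rows)) = PySem.Dict.mk (gItems 0 (pvStep rows)) := by
  have hfold : pvGeneration (PySem.Dict.mk (gItems 0 rows)) =
      PySem.Dict.mk ((PySem.Dict.mk (gItems 0 rows)).items.foldl (fun ng pv =>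
        ng.insert pv.1
          (if pv.2 = '.' then '.'
           else if pv.2 = 'L' ∧ pvNt1 (PySem.Dict.mk (gItems 0 rows)) pv.1 = 0 then '#'
           else if pv.2 = '#' ∧ pvNt1 (PySem.Dict.mk (gItems 0 rows)) pv.1 ≥ 4 then 'L'
           else pv.2)) PySem.Dict.empty).items := rfl
  apply PySem.Dict.ext
  rw [hfold]
  rw [PySem.Dict.items_foldl_insert_fresh _ _ _ _
    (fun a _ => PySem.Dict.contains_empty _)
    (by simpa using nodup_keys_gItems rows 0)]
  rw [show (PySem.Dict.empty : PySem.Dict (Int × Int) Char).items = [] from rfl, List.nil_append]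
  rw [show (PySem.Dict.mk (gItems 0 rows)).items = gItems 0 rows from rfl,
      show (PySem.Dict.mk (gItems 0 (pvStep rows))).items = gItems 0 (pvStep rows) from rfl]
  rw [pvStep_eq_stepAll, gItems_stepAll]
  apply List.map_congr_left
  intro pv _
  rw [← nt1_eq_occupiedAround rows pv.1.1 pv.1.2]
  rw [show ((pv.1.1, pv.1.2) : Int × Int) = pv.1 from rfl]
  rw [trans_eq]

theorem snd_rItems (y : Int) (row : List Char) : ∀ x, (rItems y x row).map Prod.snd = row := by
  induction row with
  | nil => intro x; simp [rItems]
  | cons c cs ih => intro x; rw [rItems, List.map_cons, ih (x + 1)]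

theorem snd_gItems (l : List (List Char)) : ∀ y0, (gItems y0 l).map Prod.snd = l.flatten := by
  induction l with
  | nil => intro y0; simp [gItems]
  | cons r rs ih =>
    intro y0
    rw [gItems, List.map_append, snd_rItems, ih (y0 + 1), List.flatten_cons]

theorem seatCount_eq_countOcc (rows : List (List Char)) :
    pvSeatCount (PySem.Dict.mk (gItems 0 rows)) = pvCountOcc rows := by
  unfold pvSeatCount pvCountOcc
  rw [show (PySem.Dict.mk (gItems 0 rows)).values = (gItems 0 rows).map Prod.snd from rfl]
  rw [snd_gItems]
  induction rows with
  | nil => simp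
  | cons r rs ih =>
    rw [List.flatten_cons, List.map_append, List.sum_append, ih, List.map_cons, List.sum_cons]
    congr 1
    rw [PySem.List.count_eq]
    induction r with
    | nil => simp
    | cons c cs ihr =>
      rw [List.map_cons, List.sum_cons, ihr, List.count_cons]
      by_cases h : c = '#'
      · subst h; simp; omega
      · simp [h]

theorem loopA_eq_rowsLoop (fuel : Nat) : ∀ (rows : List (List Char)) (last : Int),
    pvLoopA fuel (PySem.Dict.mk (gItems 0 rows)) last = rowsLoop fuel rows last := by
  induction fuel with
  | zero => intro rows last; rw [pvLoopA, rowsLoop, seatCount_eq_countOcc]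
  | succ f ih =>
    intro rows last
    rw [pvLoopA, rowsLoop]
    simp only [generation_eq_step, seatCount_eq_countOcc]
    by_cases h : last = pvCountOcc (pvStep rows)
    · rw [if_pos h, if_pos h]
    · rw [if_neg h, if_neg h, ih]

theorem pairwise_ne_enum_keys (row : List Char) (y0 s : Int) :
    ((PySem.List.enumerate row s).map (fun xc => ((xc.1, y0) : Int × Int))).Nodup := by
  have hp := PySem.List.pairwise_lt_enumerate row s
  refine List.Pairwise.map _ (fun a b hab hcon => ?_) hp
  have : a.1 = b.1 := by simpa using congrArg Prod.fst hcon
  omega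

theorem parse_fold (ls : List String) : ∀ (y0 : Int) (g : PySem.Dict (Int × Int) Char),
    (∀ k ∈ g.keys, k.2 < y0) →
    ((PySem.List.enumerate ls y0).foldl
      (fun g yr => (PySem.List.enumerate yr.2.toList 0).foldl
          (fun g' xc => g'.insert (xc.1, yr.1) xc.2) g) g).items
      = g.items ++ gItems y0 (ls.map String.toList) := by
  induction ls with
  | nil => intro y0 g _; simp [PySem.List.enumerate_nil, gItems]
  | cons r rs ih =>
    intro y0 g hk
    rw [PySem.List.enumerate_cons, List.foldl_cons]
    have hfresh : ∀ a ∈ PySem.List.enumerate r.toList 0, g.contains ((a.1, y0) : Int × Int) = false := by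
      intro a _
      by_contra hcon
      have : g.contains ((a.1, y0) : Int × Int) = true := by
        cases h : g.contains ((a.1, y0) : Int × Int)
        · exact absurd h hcon
        · rfl
      have hmem := (PySem.Dict.contains_iff_mem_keys _ _).mp this
      have := hk _ hmem
      simp at this
    have hinner := PySem.Dict.items_foldl_insert_fresh (PySem.List.enumerate r.toList 0)
      (fun xc => ((xc.1, y0) : Int × Int)) (fun xc => xc.2) g hfresh
      (pairwise_ne_enum_keys r.toList y0 0)
    have hkeys : ∀ k ∈ ((PySem.List.enumerate r.toList 0).foldl
        (fun g' xc => g'.insert (xc.1, y0) xc.2) g).keys, k.2 < y0 + 1 := by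
      intro k hkm
      rw [show (((PySem.List.enumerate r.toList 0).foldl
        (fun g' xc => g'.insert (xc.1, y0) xc.2) g).keys) = (((PySem.List.enumerate r.toList 0).foldl
        (fun g' xc => g'.insert (xc.1, y0) xc.2) g).items.map Prod.fst) from rfl, hinner] at hkm
      rw [List.map_append, List.mem_append] at hkm
      rcases hkm with h | h
      · have := hk _ h
        omega
      · rw [enumMap_eq_rItems] at h
        have := mem_rItems_fst y0 r.toList 0 k h
        omega
    rw [ih (y0 + 1) _ hkeys, hinner, enumMap_eq_rItems]
    rw [show (rs.map String.toList) = ((r :: rs).map String.toList).tail from rfl]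
    simp [gItems]

theorem parse_eq_gItems (data : String) :
    pvParse data = PySem.Dict.mk (gItems 0 ((PySem.Str.splitlines data).map String.toList)) := by
  apply PySem.Dict.ext
  unfold pvParse
  rw [parse_fold (PySem.Str.splitlines data) 0 PySem.Dict.empty (by simp)]
  rfl

theorem length_rItems (y : Int) (row : List Char) : ∀ x, (rItems y x row).length = row.length := by
  induction row with
  | nil => intro x; simp [rItems]
  | cons c cs ih => intro x; rw [rItems, List.length_cons, List.length_cons, ih (x + 1)]

theorem size_gItems (l : List (List Char)) : ∀ y0,
    (gItems y0 l).length = (l.map List.length).sum := by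
  induction l with
  | nil => intro y0; simp [gItems]
  | cons r rs ih =>
    intro y0
    rw [gItems, List.length_append, ih (y0 + 1), List.map_cons, List.sum_cons, length_rItems]


-- ---- B's seat graph ↔ the rows simulation ----

def seatRow (y : Int) : Int → List Char → List (Int × Int × Bool)
  | _, [] => []
  | x, c :: cs =>
    if c = 'L' ∨ c = '#' then (x, y, c == '#') :: seatRow y (x + 1) cs else seatRow y (x + 1) cs

def seatList : Int → List (List Char) → List (Int × Int × Bool)
  | _, [] => []
  | y, r :: rs => seatRow y 0 r ++ seatList (y + 1) rs

def idxPairs : Nat → List (Int × Int × Bool) → List ((Int × Int) × Nat)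
  | _, [] => []
  | k, s :: ss => ((s.1, s.2.1), k) :: idxPairs (k + 1) ss

def posIdx? (q : Int × Int) : List (Int × Int × Bool) → Option Nat
  | [] => none
  | s :: ss => if (s.1, s.2.1) = q then some 0 else (posIdx? q ss).map (· + 1)

def seatCountRow : List Char → Nat
  | [] => 0
  | c :: cs => (if c = 'L' ∨ c = '#' then 1 else 0) + seatCountRow cs

def renderRow : List Bool → List Char → List Char
  | _, [] => []
  | occ, c :: cs =>
    if c = 'L' ∨ c = '#' then (if occ.headD false then '#' else 'L') :: renderRow occ.tail cs
    else c :: renderRow occ cs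

def renderAll : List Bool → List (List Char) → List (List Char)
  | _, [] => []
  | occ, r :: rs => renderRow occ r :: renderAll (occ.drop (seatCountRow r)) rs

def rcell (r : List Char) (x : Int) : Option Char := if 0 ≤ x then r[x.toNat]? else none

def gatherAt (seats : List (Int × Int × Bool)) (occ : List Bool) (x y : Int) : Int :=
  ((pvAltOffsets.filterMap (fun d => posIdx? (x + d.1, y + d.2) seats)).map
    (fun j => if occ.getD j false then (1 : Int) else 0)).sum

def updOcc (seats : List (Int × Int × Bool)) (occ : List Bool) : List Bool :=
  List.zipWith (fun o c => if o then decide (c < 4) else decide (c = 0)) occ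
    (seats.map (fun s => gatherAt seats occ s.1 s.2.1))

-- basic recursion lemmas ----------------------------------------------------

theorem rcell_cons (c : Char) (cs : List Char) (x : Int) :
    rcell (c :: cs) x = if x = 0 then some c else rcell cs (x - 1) := by
  unfold rcell
  by_cases h0 : x = 0
  · subst h0; simp
  · rw [if_neg h0]
    by_cases hp : 0 ≤ x
    · have h1 : 0 ≤ x - 1 := by omega
      rw [if_pos hp, if_pos h1, show x.toNat = (x - 1).toNat + 1 from by omega,
        List.getElem?_cons_succ]
    · rw [if_neg hp, if_neg (by omega)]

theorem pvCell?_cons (r : List Char) (rs : List (List Char)) (x y : Int) :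
    pvCell? (r :: rs) x y = if y = 0 then rcell r x else pvCell? rs x (y - 1) := by
  unfold pvCell? rcell
  by_cases h0 : y = 0
  · subst h0; simp
  · rw [if_neg h0]
    by_cases hy : 0 ≤ y
    · have h1 : 0 ≤ y - 1 := by omega
      by_cases hx : 0 ≤ x
      · rw [if_pos ⟨hy, hx⟩, if_pos ⟨h1, hx⟩, show y.toNat = (y - 1).toNat + 1 from by omega,
          List.getElem?_cons_succ]
      · rw [if_neg (by tauto), if_neg (by tauto)]
    · rw [if_neg (by omega), if_neg (by omega)]

theorem headD_eq_getD (l : List Bool) : l.headD false = l.getD 0 false := by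
  cases l <;> rfl

theorem drop_getD (l : List Bool) (n j : Nat) : (l.drop n).getD j false = l.getD (n + j) false := by
  simp [List.getD_eq_getElem?_getD, List.getElem?_drop]

theorem length_seatRow (y : Int) (cs : List Char) : ∀ x, (seatRow y x cs).length = seatCountRow cs := by
  induction cs with
  | nil => intro x; rfl
  | cons c cs ih =>
    intro x
    by_cases h : c = 'L' ∨ c = '#'
    · simp [seatRow, seatCountRow, h, ih]; omega
    · simp [seatRow, seatCountRow, h, ih]

theorem posIdx?_append (q : Int × Int) (l1 l2 : List (Int × Int × Bool)) :
    posIdx? q (l1 ++ l2) =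
      match posIdx? q l1 with
      | some j => some j
      | none => (posIdx? q l2).map (· + l1.length) := by
  induction l1 with
  | nil =>
    simp only [List.nil_append, posIdx?, List.length_nil]
    cases posIdx? q l2 <;> simp
  | cons s ss ih =>
    rw [List.cons_append, posIdx?, posIdx?, ih]
    by_cases h : (s.1, s.2.1) = q
    · simp [h]
    · rw [if_neg h, if_neg h]
      cases hss : posIdx? q ss with
      | some j => simp
      | none =>
        simp only [Option.map_none]
        cases posIdx? q l2 <;> simp <;> omega

theorem posIdx?_seatRow_none_y (y0 y x : Int) (hy : y ≠ y0) (cs : List Char) : ∀ x0,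
    posIdx? (x, y) (seatRow y0 x0 cs) = none := by
  induction cs with
  | nil => intro x0; rfl
  | cons c cs ih =>
    intro x0
    by_cases h : c = 'L' ∨ c = '#'
    · rw [seatRow, if_pos h, posIdx?, if_neg (by simp [Prod.ext_iff]; omega), ih (x0 + 1)]
      rfl
    · rw [seatRow, if_neg h, ih (x0 + 1)]

theorem posIdx?_seatRow_none_x (y0 x : Int) (cs : List Char) : ∀ x0, x < x0 →
    posIdx? (x, y0) (seatRow y0 x0 cs) = none := by
  induction cs with
  | nil => intro x0 _; rfl
  | cons c cs ih =>
    intro x0 hx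
    by_cases h : c = 'L' ∨ c = '#'
    · rw [seatRow, if_pos h, posIdx?, if_neg (by simp [Prod.ext_iff]; omega), ih (x0 + 1) (by omega)]
      rfl
    · rw [seatRow, if_neg h, ih (x0 + 1) (by omega)]

theorem posIdx?_seatList_none (x y : Int) (ls : List (List Char)) : ∀ y0, y < y0 →
    posIdx? (x, y) (seatList y0 ls) = none := by
  induction ls with
  | nil => intro y0 _; rfl
  | cons r rs ih =>
    intro y0 hy
    rw [seatList, posIdx?_append, posIdx?_seatRow_none_y y0 y x (by omega), ih (y0 + 1) (by omega)]
    rfl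

-- the collect fold ----------------------------------------------------------

theorem map_add_zero (o : Option Nat) : o.map (· + 0) = o := by cases o <;> rfl

theorem get?_idxPairs (seats : List (Int × Int × Bool)) (q : Int × Int) : ∀ k,
    (PySem.Dict.mk (idxPairs k seats)).get? q = (posIdx? q seats).map (· + k) := by
  induction seats with
  | nil => intro k; rfl
  | cons s ss ih =>
    intro k
    rw [idxPairs, PySem.Dict.get?_mk_cons, posIdx?, ih (k + 1)]
    by_cases h : (s.1, s.2.1) = q
    · simp [h]
    · rw [if_neg (by simpa using h), if_neg h]
      cases posIdx? q ss with
      | none => rfl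
      | some j => simp; omega

theorem posIdx?_none_of_forall (q : Int × Int) (seats : List (Int × Int × Bool))
    (h : ∀ s ∈ seats, (s.1, s.2.1) ≠ q) : posIdx? q seats = none := by
  induction seats with
  | nil => rfl
  | cons s ss ih =>
    rw [posIdx?, if_neg (h s (by simp)), ih (fun s hs => h s (by simp [hs]))]
    rfl

theorem idxPairs_append_one (s : Int × Int × Bool) (seats : List (Int × Int × Bool)) : ∀ k,
    idxPairs k (seats ++ [s]) = idxPairs k seats ++ [((s.1, s.2.1), k + seats.length)] := by
  induction seats with
  | nil => intro k; simp [idxPairs]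
  | cons t ts ih =>
    intro k
    rw [List.cons_append, idxPairs, idxPairs, ih (k + 1), List.cons_append]
    simp; omega

-- state bound: every collected seat lies strictly before the scan position
def BndRow (seats : List (Int × Int × Bool)) (y0 x0 : Int) : Prop :=
  ∀ s ∈ seats, s.2.1 < y0 ∨ (s.2.1 = y0 ∧ s.1 < x0)

theorem collect_row (y0 : Int) (cs : List Char) : ∀ (x0 : Int) (seats : List (Int × Int × Bool)),
    BndRow seats y0 x0 →
    (PySem.List.enumerate cs x0).foldl
      (fun st' xc =>
        if xc.2 = 'L' ∨ xc.2 = '#' then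
          (st'.1 ++ [(xc.1, y0, xc.2 == '#')], st'.2.insert (xc.1, y0) st'.1.length)
        else st')
      (seats, PySem.Dict.mk (idxPairs 0 seats))
    = (seats ++ seatRow y0 x0 cs,
       PySem.Dict.mk (idxPairs 0 (seats ++ seatRow y0 x0 cs))) := by
  induction cs with
  | nil => intro x0 seats _; simp [PySem.List.enumerate_nil, seatRow]
  | cons c cs ih =>
    intro x0 seats hb
    rw [PySem.List.enumerate_cons, List.foldl_cons]
    by_cases h : c = 'L' ∨ c = '#'
    · have hfresh : ∀ s ∈ seats, (s.1, s.2.1) ≠ ((x0, y0) : Int × Int) := by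
        intro s hs hc
        have := hb s hs
        have h1 : s.1 = x0 := congrArg Prod.fst hc
        have h2 : s.2.1 = y0 := congrArg Prod.snd hc
        omega
      have hnc : (PySem.Dict.mk (idxPairs 0 seats)).contains ((x0, y0) : Int × Int) = false := by
        have hg : (PySem.Dict.mk (idxPairs 0 seats)).get? ((x0, y0) : Int × Int) = none := by
          rw [get?_idxPairs, posIdx?_none_of_forall _ _ hfresh]; rfl
        rw [PySem.Dict.contains_eq_isSome_get?, hg]; rfl
      have hins : (PySem.Dict.mk (idxPairs 0 seats)).insert ((x0, y0) : Int × Int) seats.length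
          = PySem.Dict.mk (idxPairs 0 (seats ++ [(x0, y0, c == '#')])) := by
        apply PySem.Dict.ext
        rw [PySem.Dict.items_insert_of_not_contains _ _ hnc]
        rw [show (PySem.Dict.mk (idxPairs 0 seats)).items = idxPairs 0 seats from rfl]
        rw [show (PySem.Dict.mk (idxPairs 0 (seats ++ [(x0, y0, c == '#')]))).items
            = idxPairs 0 (seats ++ [(x0, y0, c == '#')]) from rfl]
        rw [idxPairs_append_one]
        simp
      simp only [h, if_pos, if_true]
      rw [hins]
      have hb' : BndRow (seats ++ [(x0, y0, c == '#')]) y0 (x0 + 1) := by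
        intro s hs
        rcases List.mem_append.mp hs with hs | hs
        · have := hb s hs; omega
        · simp at hs; subst hs; simp
      rw [ih (x0 + 1) _ hb']
      rw [seatRow, if_pos h, List.append_assoc]
      rfl
    · simp only [h, if_false, if_neg]
      have hb' : BndRow seats y0 (x0 + 1) := by intro s hs; have := hb s hs; omega
      rw [ih (x0 + 1) _ hb', seatRow, if_neg h]

def BndAll (seats : List (Int × Int × Bool)) (y0 : Int) : Prop := ∀ s ∈ seats, s.2.1 < y0

theorem mem_seatRow (y0 : Int) (cs : List Char) : ∀ x0 s, s ∈ seatRow y0 x0 cs → s.2.1 = y0 := by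
  induction cs with
  | nil => intro x0 s h; simp [seatRow] at h
  | cons c cs ih =>
    intro x0 s h
    by_cases hc : c = 'L' ∨ c = '#'
    · rw [seatRow, if_pos hc, List.mem_cons] at h
      rcases h with h | h
      · subst h; rfl
      · exact ih (x0 + 1) s h
    · rw [seatRow, if_neg hc] at h
      exact ih (x0 + 1) s h

theorem collect_all (ls : List String) : ∀ (y0 : Int) (seats : List (Int × Int × Bool)),
    BndAll seats y0 →
    (PySem.List.enumerate ls y0).foldl
      (fun st yr => (PySem.List.enumerate yr.2.toList 0).foldl
        (fun st' xc =>
          if xc.2 = 'L' ∨ xc.2 = '#' then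
            (st'.1 ++ [(xc.1, yr.1, xc.2 == '#')], st'.2.insert (xc.1, yr.1) st'.1.length)
          else st') st)
      (seats, PySem.Dict.mk (idxPairs 0 seats))
    = (seats ++ seatList y0 (ls.map String.toList),
       PySem.Dict.mk (idxPairs 0 (seats ++ seatList y0 (ls.map String.toList)))) := by
  induction ls with
  | nil => intro y0 seats _; simp [PySem.List.enumerate_nil, seatList]
  | cons r rs ih =>
    intro y0 seats hb
    rw [PySem.List.enumerate_cons, List.foldl_cons]
    have hbrow : BndRow seats y0 0 := by intro s hs; exact Or.inl (hb s hs)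
    rw [collect_row y0 r.toList 0 seats hbrow]
    have hb' : BndAll (seats ++ seatRow y0 0 r.toList) (y0 + 1) := by
      intro s hs
      rcases List.mem_append.mp hs with hs | hs
      · have := hb s hs; omega
      · have := mem_seatRow y0 r.toList 0 s hs; omega
    rw [ih (y0 + 1) _ hb']
    rw [show (rs.map String.toList) = ((r :: rs).map String.toList).tail from rfl]
    simp [seatList, List.append_assoc]

theorem collect_eq (data : String) :
    pvCollect data = (seatList 0 ((PySem.Str.splitlines data).map String.toList),
      PySem.Dict.mk (idxPairs 0 (seatList 0 ((PySem.Str.splitlines data).map String.toList)))) := by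
  unfold pvCollect
  have h := collect_all (PySem.Str.splitlines data) 0 [] (by intro s hs; simp at hs)
  rw [show (PySem.Dict.mk (idxPairs 0 ([] : List (Int × Int × Bool))))
      = (PySem.Dict.empty : PySem.Dict (Int × Int) Nat) from rfl] at h
  rw [h]
  simp

-- render / lookup master lemma ----------------------------------------------

theorem renderRow_master (y0 : Int) (cs : List Char) : ∀ (occ : List Bool) (x0 x : Int),
    rcell (renderRow occ cs) (x - x0) =
      match posIdx? (x, y0) (seatRow y0 x0 cs) with
      | some j => some (if occ.getD j false then '#' else 'L')
      | none => rcell cs (x - x0) := by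
  induction cs with
  | nil => intro occ x0 x; rfl
  | cons c cs ih =>
    intro occ x0 x
    by_cases h : c = 'L' ∨ c = '#'
    · rw [renderRow, if_pos h, seatRow, if_pos h, posIdx?]
      by_cases hx : x = x0
      · subst hx
        rw [if_pos rfl, rcell_cons, if_pos (show x - x = 0 by omega), headD_eq_getD]
      · rw [if_neg (show ¬((x0, y0) = ((x, y0) : Int × Int)) by simp; omega)]
        rw [rcell_cons, if_neg (show ¬(x - x0 = 0) by omega),
            rcell_cons (c := c), if_neg (show ¬(x - x0 = 0) by omega)]
        rw [show x - x0 - 1 = x - (x0 + 1) from by omega]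
        rw [ih occ.tail (x0 + 1) x]
        cases hp : posIdx? (x, y0) (seatRow y0 (x0 + 1) cs) with
        | none => rfl
        | some j => simp
    · rw [renderRow, if_neg h, seatRow, if_neg h]
      by_cases hx : x = x0
      · subst hx
        rw [posIdx?_seatRow_none_x y0 x cs (x + 1) (by omega)]
        rw [rcell_cons, if_pos (show x - x = 0 by omega), rcell_cons,
            if_pos (show x - x = 0 by omega)]
      · rw [rcell_cons, if_neg (show ¬(x - x0 = 0) by omega),
            rcell_cons (c := c), if_neg (show ¬(x - x0 = 0) by omega)]
        rw [show x - x0 - 1 = x - (x0 + 1) from by omega]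
        exact ih occ (x0 + 1) x


theorem renderAll_master (ls : List (List Char)) : ∀ (occ : List Bool) (y0 x y : Int),
    pvCell? (renderAll occ ls) x (y - y0) =
      match posIdx? (x, y) (seatList y0 ls) with
      | some j => some (if occ.getD j false then '#' else 'L')
      | none => pvCell? ls x (y - y0) := by
  induction ls with
  | nil => intro occ y0 x y; rfl
  | cons r rs ih =>
    intro occ y0 x y
    rw [renderAll, seatList, posIdx?_append]
    by_cases hy : y = y0
    · subst hy
      rw [posIdx?_seatList_none x y rs (y + 1) (by omega)]
      rw [pvCell?_cons, if_pos (show y - y = 0 by omega),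
          pvCell?_cons (r := r), if_pos (show y - y = 0 by omega)]
      have hm := renderRow_master y r occ 0 x
      rw [show x - 0 = x from by omega] at hm
      rw [hm]
      cases hp : posIdx? (x, y) (seatRow y 0 r) <;> simp [hp]
    · rw [pvCell?_cons, if_neg (show ¬(y - y0 = 0) by omega),
          pvCell?_cons (r := r), if_neg (show ¬(y - y0 = 0) by omega)]
      rw [show y - y0 - 1 = y - (y0 + 1) from by omega]
      rw [posIdx?_seatRow_none_y y0 y x hy]
      have := ih (occ.drop (seatCountRow r)) (y0 + 1) x y
      rw [length_seatRow]
      cases hp : posIdx? (x, y) (seatList (y0 + 1) rs) with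
      | none => rw [hp] at this; simpa using this
      | some j =>
        rw [hp] at this
        simp only [Option.map_some]
        rw [this]
        simp [drop_getD, Nat.add_comm]

theorem no_sharp_row (y0 : Int) (cs : List Char) : ∀ (x0 x : Int),
    posIdx? (x, y0) (seatRow y0 x0 cs) = none → rcell cs (x - x0) ≠ some '#' := by
  induction cs with
  | nil => intro x0 x _; simp [rcell]
  | cons c cs ih =>
    intro x0 x hnone
    by_cases h : c = 'L' ∨ c = '#'
    · rw [seatRow, if_pos h, posIdx?] at hnone
      by_cases hx : x = x0
      · subst hx; rw [if_pos rfl] at hnone; exact absurd hnone (by simp)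
      · rw [if_neg (by simp [Prod.ext_iff]; omega)] at hnone
        have hrest : posIdx? (x, y0) (seatRow y0 (x0 + 1) cs) = none := by
          cases hp : posIdx? (x, y0) (seatRow y0 (x0 + 1) cs) with
          | none => rfl
          | some j => rw [hp] at hnone; simp at hnone
        rw [rcell_cons, if_neg (show ¬(x - x0 = 0) by omega),
            show x - x0 - 1 = x - (x0 + 1) from by omega]
        exact ih (x0 + 1) x hrest
    · rw [seatRow, if_neg h] at hnone
      by_cases hx : x = x0
      · subst hx
        rw [rcell_cons, if_pos (show x - x = 0 by omega)]
        intro hc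
        exact h (Or.inr (by injection hc))
      · rw [rcell_cons, if_neg (show ¬(x - x0 = 0) by omega),
            show x - x0 - 1 = x - (x0 + 1) from by omega]
        exact ih (x0 + 1) x hnone

theorem no_sharp_all (ls : List (List Char)) : ∀ (y0 x y : Int),
    posIdx? (x, y) (seatList y0 ls) = none → pvCell? ls x (y - y0) ≠ some '#' := by
  induction ls with
  | nil => intro y0 x y _; simp [pvCell?]
  | cons r rs ih =>
    intro y0 x y hnone
    rw [seatList, posIdx?_append] at hnone
    by_cases hy : y = y0
    · subst hy
      have hrow : posIdx? (x, y) (seatRow y 0 r) = none := by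
        cases hp : posIdx? (x, y) (seatRow y 0 r) with
        | none => rfl
        | some j => rw [hp] at hnone; simp at hnone
      rw [pvCell?_cons, if_pos (show y - y = 0 by omega)]
      have := no_sharp_row y r 0 x hrow
      rw [show x - 0 = x from by omega] at this
      exact this
    · rw [posIdx?_seatRow_none_y y0 y x hy] at hnone
      have hrest : posIdx? (x, y) (seatList (y0 + 1) rs) = none := by
        cases hp : posIdx? (x, y) (seatList (y0 + 1) rs) with
        | none => rfl
        | some j => rw [hp] at hnone; simp at hnone
      rw [pvCell?_cons, if_neg (show ¬(y - y0 = 0) by omega),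
          show y - y0 - 1 = y - (y0 + 1) from by omega]
      exact ih (y0 + 1) x y hrest

-- gather = neighbour probing over the rendered grid --------------------------

theorem filterMap_sum (l : List (Int × Int)) (f : Int × Int → Option Nat) (g : Nat → Int) :
    ((l.filterMap f).map g).sum
      = (l.map (fun d => match f d with | some j => g j | none => 0)).sum := by
  induction l with
  | nil => rfl
  | cons a as ih =>
    rw [List.filterMap_cons]
    cases hfa : f a with
    | none => simp [hfa, ih]
    | some j => simp [hfa, ih]

theorem altOffsets_eq : pvAltOffsets = pvNeighbours := by decide

theorem gather_eq_around (rows0 : List (List Char)) (occ : List Bool) (x y : Int) :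
    gatherAt (seatList 0 rows0) occ x y = pvOccupiedAround (renderAll occ rows0) x y := by
  unfold gatherAt pvOccupiedAround
  rw [altOffsets_eq, filterMap_sum]
  congr 1
  apply List.map_congr_left
  intro d _
  have hm := renderAll_master rows0 occ 0 (x + d.1) (y + d.2)
  rw [show y + d.2 - 0 = y + d.2 from by omega] at hm
  cases hp : posIdx? (x + d.1, y + d.2) (seatList 0 rows0) with
  | some j =>
    rw [hp] at hm
    simp only [hp, hm]
    by_cases ho : occ.getD j false
    · simp [ho]
    · simp [ho]
  | none =>
    rw [hp] at hm
    have hns := no_sharp_all rows0 0 (x + d.1) (y + d.2) hp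
    rw [show y + d.2 - 0 = y + d.2 from by omega] at hns
    simp only [hp, hm]
    simp [hns]

-- occupied count of a rendered grid ------------------------------------------

def seatCountAll : List (List Char) → Nat
  | [] => 0
  | r :: rs => seatCountRow r + seatCountAll rs

theorem length_seatList (ls : List (List Char)) : ∀ y0,
    (seatList y0 ls).length = seatCountAll ls := by
  induction ls with
  | nil => intro y0; rfl
  | cons r rs ih =>
    intro y0
    rw [seatList, List.length_append, length_seatRow, ih (y0 + 1), seatCountAll]

theorem count_cons_int (x a : Char) (l : List Char) :
    (((x :: l).count a : Nat) : Int) = ((l.count a : Nat) : Int) + (if x = a then 1 else 0) := by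
  rw [List.count_cons]
  by_cases hx : x = a <;> simp [hx]

theorem count_renderRow (cs : List Char) : ∀ (occ : List Bool), seatCountRow cs ≤ occ.length →
    ((renderRow occ cs).count '#' : Int) + pvBoolSum (occ.drop (seatCountRow cs)) = pvBoolSum occ := by
  induction cs with
  | nil => intro occ _; simp [renderRow, seatCountRow]
  | cons c cs ih =>
    intro occ hlen
    by_cases h : c = 'L' ∨ c = '#'
    · rw [seatCountRow, if_pos h] at hlen ⊢
      cases occ with
      | nil => simp at hlen
      | cons o os =>
        have hlen' : seatCountRow cs ≤ os.length := by simp at hlen; omega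
        have hih := ih os hlen'
        rw [renderRow, if_pos h]
        rw [show (1 + seatCountRow cs) = seatCountRow cs + 1 from by omega, List.drop_succ_cons]
        rw [show (o :: os : List Bool).tail = os from rfl,
            show ((o :: os : List Bool).headD false) = o from rfl]
        rw [count_cons_int]
        have hsel : ((if (if o then '#' else 'L') = '#' then (1 : Int) else 0)) = (if o then 1 else 0) := by
          cases o <;> simp
        rw [hsel]
        have hbs : pvBoolSum (o :: os) = (if o then (1 : Int) else 0) + pvBoolSum os := by
          simp [pvBoolSum]
        rw [hbs]
        omega
    · rw [seatCountRow, if_neg h] at hlen ⊢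
      rw [Nat.zero_add] at hlen ⊢
      rw [renderRow, if_neg h, count_cons_int, if_neg (fun hc => h (Or.inr hc))]
      have hih := ih occ hlen
      omega

theorem countOcc_renderAll (ls : List (List Char)) : ∀ (occ : List Bool),
    occ.length = seatCountAll ls → pvCountOcc (renderAll occ ls) = pvBoolSum occ := by
  induction ls with
  | nil =>
    intro occ hlen
    have : occ = [] := List.length_eq_zero_iff.mp (by rw [hlen]; rfl)
    subst this; rfl
  | cons r rs ih =>
    intro occ hlen
    rw [renderAll]
    rw [show pvCountOcc (renderRow occ r :: renderAll (occ.drop (seatCountRow r)) rs)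
        = ((PySem.List.count (renderRow occ r) '#' : Int))
          + pvCountOcc (renderAll (occ.drop (seatCountRow r)) rs) from by
      simp [pvCountOcc]]
    rw [PySem.List.count_eq]
    have hle : seatCountRow r ≤ occ.length := by rw [hlen, seatCountAll]; omega
    have h1 := count_renderRow r occ hle
    have h2 := ih (occ.drop (seatCountRow r)) (by rw [List.length_drop, hlen, seatCountAll]; omega)
    rw [h2]
    omega

-- the initial grid is its own rendering ---------------------------------------

theorem renderRow_init (y0 : Int) (cs : List Char) : ∀ (x0 : Int) (rest : List Bool),
    renderRow ((seatRow y0 x0 cs).map (fun s => s.2.2) ++ rest) cs = cs := by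
  induction cs with
  | nil => intro x0 rest; rfl
  | cons c cs ih =>
    intro x0 rest
    by_cases h : c = 'L' ∨ c = '#'
    · rw [seatRow, if_pos h, renderRow, if_pos h]
      simp only [List.map_cons, List.cons_append, List.headD_cons, List.tail_cons]
      rw [ih (x0 + 1) rest]
      rcases h with h | h
      · subst h; simp
      · subst h; simp
    · rw [seatRow, if_neg h, renderRow, if_neg h, ih (x0 + 1) rest]

theorem renderAll_init (ls : List (List Char)) : ∀ (y0 : Int) (rest : List Bool),
    renderAll ((seatList y0 ls).map (fun s => s.2.2) ++ rest) ls = ls := by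
  induction ls with
  | nil => intro y0 rest; rfl
  | cons r rs ih =>
    intro y0 rest
    rw [seatList, renderAll, List.map_append, List.append_assoc]
    rw [renderRow_init y0 r 0]
    congr 1
    rw [List.drop_append_of_le_length (by simp [length_seatRow]),
        show ((seatRow y0 0 r).map (fun s => s.2.2)).drop (seatCountRow r) = [] from by
          apply List.drop_of_length_le; simp [length_seatRow]]
    rw [List.nil_append]
    exact ih (y0 + 1) rest

-- one generation: stepping the rendered grid renders the updated occupancy ----

theorem updOcc_getD (seats : List (Int × Int × Bool)) (occ : List Bool) (k : Nat)
    (hk : k < seats.length) (hlen : occ.length = seats.length) (s : Int × Int × Bool)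
    (hs : seats[k]? = some s) :
    (updOcc seats occ).getD k false =
      (if occ.getD k false then decide (gatherAt seats occ s.1 s.2.1 < 4)
       else decide (gatherAt seats occ s.1 s.2.1 = 0)) := by
  unfold updOcc
  have hko : k < occ.length := by omega
  rw [List.getD_eq_getElem?_getD, List.getElem?_zipWith]
  rw [List.getElem?_map, hs]
  rw [show occ[k]? = some occ[k] from List.getElem?_eq_getElem hko]
  simp only [Option.map_some]
  rw [show occ.getD k false = occ[k] from by
    rw [List.getD_eq_getElem?_getD, List.getElem?_eq_getElem hko]; rfl]
  rfl

theorem length_updOcc (seats : List (Int × Int × Bool)) (occ : List Bool)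
    (hlen : occ.length = seats.length) : (updOcc seats occ).length = occ.length := by
  unfold updOcc
  simp [hlen]

theorem step_render_row (rows0 : List (List Char)) (occ : List Bool)
    (hlen : occ.length = (seatList 0 rows0).length) (y0 : Int) (cs : List Char) :
    ∀ (x0 : Int) (k : Nat) (tail : List (Int × Int × Bool)),
    (seatList 0 rows0).drop k = seatRow y0 x0 cs ++ tail →
    stepRow (renderAll occ rows0) y0 x0 (renderRow (occ.drop k) cs)
      = renderRow ((updOcc (seatList 0 rows0) occ).drop k) cs := by
  induction cs with
  | nil => intro x0 k tail _; rfl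
  | cons c cs ih =>
    intro x0 k tail hdrop
    by_cases h : c = 'L' ∨ c = '#'
    · rw [seatRow, if_pos h] at hdrop
      have hk : k < (seatList 0 rows0).length := by
        by_contra hge
        have : (seatList 0 rows0).drop k = [] := List.drop_of_length_le (by omega)
        rw [this] at hdrop
        exact absurd hdrop.symm (by simp)
      have hsk : (seatList 0 rows0)[k]? = some (x0, y0, c == '#') := by
        have h0 : ((seatList 0 rows0).drop k)[0]? = some (x0, y0, c == '#') := by
          rw [hdrop]; rfl
        rw [List.getElem?_drop] at h0
        simpa using h0
      have hcntdef := gather_eq_around rows0 occ x0 y0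
      have hupdk := updOcc_getD (seatList 0 rows0) occ k hk hlen _ hsk
      have hochead : (occ.drop k).headD false = occ.getD k false := by
        rw [headD_eq_getD, drop_getD, Nat.add_zero]
      have hupdhead : ((updOcc (seatList 0 rows0) occ).drop k).headD false
          = (updOcc (seatList 0 rows0) occ).getD k false := by
        rw [headD_eq_getD, drop_getD, Nat.add_zero]
      rw [renderRow, if_pos h, renderRow, if_pos h]
      rw [stepRow]
      have htails : stepRow (renderAll occ rows0) y0 (x0 + 1) (renderRow (occ.drop k).tail cs)
          = renderRow ((updOcc (seatList 0 rows0) occ).drop k).tail cs := by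
        rw [List.tail_drop, List.tail_drop]
        apply ih (x0 + 1) (k + 1) tail
        rw [← List.tail_drop, hdrop]
        rfl
      rw [htails]
      congr 1
      rw [hochead, hupdhead, hupdk]
      rw [show gatherAt (seatList 0 rows0) occ
            ((x0, y0, (c == '#')) : Int × Int × Bool).1
            ((x0, y0, (c == '#')) : Int × Int × Bool).2.1
          = gatherAt (seatList 0 rows0) occ x0 y0 from rfl]
      rw [← hcntdef]
      by_cases ho : occ.getD k false = true
      · simp only [ho, if_true]
        by_cases hge : (4 : Int) ≤ gatherAt (seatList 0 rows0) occ x0 y0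
        · simp [show ¬gatherAt (seatList 0 rows0) occ x0 y0 < 4 from by omega,
                show gatherAt (seatList 0 rows0) occ x0 y0 ≥ 4 from hge]
        · simp [show gatherAt (seatList 0 rows0) occ x0 y0 < 4 from by omega,
                show ¬gatherAt (seatList 0 rows0) occ x0 y0 ≥ 4 from hge]
      · simp only [ho, if_false]
        by_cases hz : gatherAt (seatList 0 rows0) occ x0 y0 = 0
        · simp [hz]
        · simp [hz]
    · rw [seatRow, if_neg h] at hdrop
      rw [renderRow, if_neg h, renderRow, if_neg h, stepRow]
      rw [if_neg h]
      congr 1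
      exact ih (x0 + 1) k tail hdrop

theorem step_render_all (rows0 : List (List Char)) (occ : List Bool)
    (hlen : occ.length = (seatList 0 rows0).length) (ls : List (List Char)) :
    ∀ (y0 : Int) (k : Nat),
    (seatList 0 rows0).drop k = seatList y0 ls →
    stepAll (renderAll occ rows0) y0 (renderAll (occ.drop k) ls)
      = renderAll ((updOcc (seatList 0 rows0) occ).drop k) ls := by
  induction ls with
  | nil => intro y0 k _; rfl
  | cons r rs ih =>
    intro y0 k hdrop
    rw [seatList] at hdrop
    rw [renderAll, renderAll, stepAll]
    congr 1
    · exact step_render_row rows0 occ hlen y0 r 0 k (seatList (y0 + 1) rs) hdrop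
    · have h1 : (occ.drop k).drop (seatCountRow r) = occ.drop (k + seatCountRow r) :=
        List.drop_drop ..
      have h2 : ((updOcc (seatList 0 rows0) occ).drop k).drop (seatCountRow r)
          = (updOcc (seatList 0 rows0) occ).drop (k + seatCountRow r) := List.drop_drop ..
      rw [h1, h2]
      have hd2 : (seatList 0 rows0).drop (k + seatCountRow r) = seatList (y0 + 1) rs := by
        have hca := congrArg (List.drop (seatCountRow r)) hdrop
        rw [List.drop_drop] at hca
        rw [hca, ← length_seatRow y0 r 0, List.drop_left]
      exact ih (y0 + 1) (k + seatCountRow r) hd2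

theorem step_render (rows0 : List (List Char)) (occ : List Bool)
    (hlen : occ.length = (seatList 0 rows0).length) :
    pvStep (renderAll occ rows0) = renderAll (updOcc (seatList 0 rows0) occ) rows0 := by
  rw [pvStep_eq_stepAll]
  have := step_render_all rows0 occ hlen rows0 0 0 (by simp)
  simpa using this

-- the loops run in lockstep ---------------------------------------------------

theorem adj_eq (seats : List (Int × Int × Bool)) (occ : List Bool) :
    (pvAdj seats (PySem.Dict.mk (idxPairs 0 seats))).map (fun neigh =>
        (neigh.map (fun j => if occ.getD j false then (1 : Int) else 0)).sum)
      = seats.map (fun s => gatherAt seats occ s.1 s.2.1) := by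
  unfold pvAdj
  rw [List.map_map]
  apply List.map_congr_left
  intro s _
  unfold gatherAt
  simp only [Function.comp]
  congr 2
  apply List.filterMap_congr
  intro d _
  rw [get?_idxPairs, map_add_zero]

theorem loops_eq (rows0 : List (List Char)) (fuel : Nat) :
    ∀ (occ : List Bool) (last : Int), occ.length = (seatList 0 rows0).length →
    rowsLoop fuel (renderAll occ rows0) last
      = pvLoopAlt (pvAdj (seatList 0 rows0) (PySem.Dict.mk (idxPairs 0 (seatList 0 rows0))))
          fuel occ last := by
  induction fuel with
  | zero =>
    intro occ last hlen
    rw [rowsLoop, pvLoopAlt, countOcc_renderAll rows0 occ (by rw [hlen, length_seatList])]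
  | succ f ih =>
    intro occ last hlen
    rw [rowsLoop, pvLoopAlt]
    rw [adj_eq (seatList 0 rows0) occ]
    rw [show List.zipWith (fun o c => if o then decide (c < 4) else decide (c = 0)) occ
          ((seatList 0 rows0).map (fun s => gatherAt (seatList 0 rows0) occ s.1 s.2.1))
        = updOcc (seatList 0 rows0) occ from rfl]
    rw [step_render rows0 occ hlen]
    have hlen' : (updOcc (seatList 0 rows0) occ).length = (seatList 0 rows0).length := by
      rw [length_updOcc _ _ hlen, hlen]
    rw [countOcc_renderAll rows0 _ (by rw [hlen', length_seatList])]
    by_cases h : last = pvBoolSum (updOcc (seatList 0 rows0) occ)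
    · rw [if_pos h, if_pos h]
    · rw [if_neg h, if_neg h]
      exact ih (updOcc (seatList 0 rows0) occ) _ hlen'

-- ===== VERDICT (by name: the statement is the Claim_ definition above) =====
theorem seating_system_part1_spec : Claim_equal_seating_system_part1 := by
  intro data _
  unfold Spec_seating_system_part1 seating_system_part1 seating_system_part1_alt
  set rows0 := (PySem.Str.splitlines data).map String.toList with hrows0
  rw [parse_eq_gItems data, collect_eq data]
  dsimp only
  rw [show (PySem.Dict.mk (gItems 0 rows0)).size = (gItems 0 rows0).length from rfl, size_gItems]
  rw [show ((PySem.Str.splitlines data).map (fun r => r.toList.length)).sum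
      = (rows0.map List.length).sum from by rw [hrows0, List.map_map]; rfl]
  rw [loopA_eq_rowsLoop]
  have hinit : rows0 = renderAll ((seatList 0 rows0).map (fun s => s.2.2)) rows0 := by
    have := renderAll_init rows0 0 []
    rw [List.append_nil] at this
    exact this.symm
  rw [show rowsLoop (2 ^ ((rows0.map List.length).sum + 1) + 2) rows0 0
      = rowsLoop (2 ^ ((rows0.map List.length).sum + 1) + 2)
          (renderAll ((seatList 0 rows0).map (fun s => s.2.2)) rows0) 0 from by
    rw [← hinit]]
  rw [loops_eq rows0 _ _ 0 (by simp)]
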